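-- pv_equiv track=rewrite | github.com/codingismycraft/codingismycraft | algorithms/subsectors.py | subsectors
-- ===== SOURCE A (Python) =====
-- def subsectors(s1):
--     if not s1:
--         return []
--     head = s1[0]
--     sectors = [head]
--     for s in subsectors(s1[1:]):
--         sectors.append(head + s)
--     sectors.extend(subsectors(s1[1:]))
--     return sectors
-- ===== SOURCE B (Python) =====
-- def subsectors(s1):
--     result = []
--     for ch in reversed(s1):
--         result = [ch] + [ch + r for r in result] + result
--     return result
-- ===== Notes on version B (the rewrite author's own statement) =====
-- stated objective: faster
-- what changed: Replaces the exponential double recursion (subsectors(s1[1:]) computed twice per level) with a single right-to-left iterative pass that reuses the previous result once; intended as asymptotically faster (O(n*2^n) vs O(n^2*2^n)); measured 6.34x at n=16, both time out at n=64 since the output itself has 2^n elements.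
import Mathlib
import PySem

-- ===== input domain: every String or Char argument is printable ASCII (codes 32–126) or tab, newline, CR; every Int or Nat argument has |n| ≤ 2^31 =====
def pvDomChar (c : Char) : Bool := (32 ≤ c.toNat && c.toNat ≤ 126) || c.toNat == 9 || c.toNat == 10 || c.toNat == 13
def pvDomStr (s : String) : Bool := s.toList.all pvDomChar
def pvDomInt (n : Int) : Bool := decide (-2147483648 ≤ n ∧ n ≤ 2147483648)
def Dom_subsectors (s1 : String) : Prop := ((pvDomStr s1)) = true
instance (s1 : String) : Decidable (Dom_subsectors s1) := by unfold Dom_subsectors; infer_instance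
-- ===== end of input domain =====

-- B replaces A's exponential double recursion with one iterative right-to-left pass
-- reusing the previous result once; intended as faster (measured 6.34x at n=16; the
-- output itself is exponential in n).

-- ===== PORT A =====
-- A's recursion, over the string's characters (Python strings become List Char here;
-- 'head + s' is exact as cons of the head character).
def subsectorsGo (l : List Char) : List (List Char) :=
  match l with
  | [] => []
  | head :: t =>
      -- sectors = [head]; for s in subsectors(s1[1:]): sectors.append(head + s)
      -- sectors.extend(subsectors(s1[1:]))  -- the recursive call is made twice, as in A
      ([head] :: (subsectorsGo t).map (fun s => head :: s)) ++ subsectorsGo t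

def subsectors (s1 : String) : List String :=
  (subsectorsGo s1.toList).map String.mk

-- ===== PORT B =====
-- B's single fold from the back: result = [ch] + [ch + r for r in result] + result
def subsectorsAltStep (ch : Char) (result : List (List Char)) : List (List Char) :=
  ([ch] :: result.map (fun r => ch :: r)) ++ result

def subsectors_alt (s1 : String) : List String :=
  (s1.toList.foldr subsectorsAltStep []).map String.mk

-- ===== PRECONDITION & SPEC =====
def Spec_subsectors (s1 : String) (out : List String) : Prop := out = subsectors_alt s1
instance (s1 : String) (out : List String) : Decidable (Spec_subsectors s1 out) := by unfold Spec_subsectors; infer_instance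

-- ===== CLAIM (what is proved, stated in full; the proofs are below) =====
def Claim_equal_subsectors : Prop := ∀ (s1 : String), Dom_subsectors s1 → Spec_subsectors s1 (subsectors s1)

-- ===== LEMMAS AND PROOFS =====
theorem subsectorsGo_eq_foldr (l : List Char) :
    subsectorsGo l = l.foldr subsectorsAltStep [] := by
  induction l with
  | nil => rfl
  | cons h t ih => simp [subsectorsGo, subsectorsAltStep, ih]

-- ===== VERDICT (by name: the statement is the Claim_ definition above) =====
theorem subsectors_spec : Claim_equal_subsectors := by
  intro s1 _
  unfold Spec_subsectors subsectors subsectors_alt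
  rw [subsectorsGo_eq_foldr]
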